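-- pv_equiv track=rewrite | github.com/ludwigpacifici/adventofcode2023 | day1/1.py | part1
-- ===== SOURCE A (Python) =====
-- def part1(l):
--     first = 0
--     for c in l:
--         if c.isdigit():
--             first = int(c)
--             break
--     last = 0
--     for c in list(reversed(l)):
--         if c.isdigit():
--             last = int(c)
--             break
--     return (first, last)
-- ===== SOURCE B (Python) =====
-- def part1(l):
--     first = 0
--     last = 0
--     found = False
--     for c in l:
--         if c.isdigit():
--             d = int(c)
--             if not found:
--                 first = d
--                 found = True
--             last = d
--     return (first, last)
-- ===== Notes on version B (the rewrite author's own statement) =====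
-- stated objective: simpler
-- what changed: Single forward pass maintaining first (guarded by a found flag) and last, replacing A's two separate scans (forward with break, plus a scan of list(reversed(l))); avoiding the reversed-list materialisation and second scan is the constant-factor win.
import Mathlib
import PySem

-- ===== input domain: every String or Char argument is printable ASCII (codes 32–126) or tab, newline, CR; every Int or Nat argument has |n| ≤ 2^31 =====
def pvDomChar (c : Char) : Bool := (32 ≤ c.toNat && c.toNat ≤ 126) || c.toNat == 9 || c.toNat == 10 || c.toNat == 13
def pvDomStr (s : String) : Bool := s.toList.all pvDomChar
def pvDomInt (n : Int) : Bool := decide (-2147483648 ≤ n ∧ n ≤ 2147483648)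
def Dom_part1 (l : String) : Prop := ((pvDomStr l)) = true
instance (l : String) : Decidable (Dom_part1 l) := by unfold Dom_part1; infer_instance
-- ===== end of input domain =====

-- B replaces A's two scans (forward with break, plus a scan of the reversed list) by one
-- forward pass maintaining first (guarded by a found flag) and last; same result, simpler.

-- ===== PORT A =====
-- one 'for c in …: if c.isdigit(): x = int(c); break' loop; accumulator is the variable's
-- value before the loop (0).  int(c) on a single digit char is its value (c.toNat - 48; exact).
def part1Scan : List Char → Int → Int
  | [], x => x
  | c :: cs, x => if PySem.Chars.isdigit c then (c.toNat : Int) - 48 else part1Scan cs x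

def part1 (l : String) : Int × Int :=
  (part1Scan l.toList 0, part1Scan l.toList.reverse 0)

-- ===== PORT B =====
def part1AltLoop : List Char → Bool → Int → Int → Int × Int
  | [], _, first, last => (first, last)
  | c :: cs, found, first, last =>
    if PySem.Chars.isdigit c then
      let d : Int := (c.toNat : Int) - 48
      part1AltLoop cs true (if found then first else d) d
    else
      part1AltLoop cs found first last

def part1_alt (l : String) : Int × Int :=
  part1AltLoop l.toList false 0 0

-- ===== PRECONDITION & SPEC =====
def Spec_part1 (l : String) (out : Int × Int) : Prop := out = part1_alt l
instance (l : String) (out : Int × Int) : Decidable (Spec_part1 l out) := by unfold Spec_part1; infer_instance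

-- ===== CLAIM (what is proved, stated in full; the proofs are below) =====
def Claim_equal_part1 : Prop := ∀ (l : String), Dom_part1 l → Spec_part1 l (part1 l)

-- ===== LEMMAS AND PROOFS =====
theorem part1Scan_append (ys : List Char) (c : Char) (x : Int) :
    part1Scan (ys ++ [c]) x
      = part1Scan ys (if PySem.Chars.isdigit c then (c.toNat : Int) - 48 else x) := by
  induction ys with
  | nil => simp [part1Scan]
  | cons y ys ih => by_cases h : PySem.Chars.isdigit y <;> simp [part1Scan, h, ih]

theorem part1AltLoop_eq (cs : List Char) :
    ∀ (found : Bool) (f l : Int),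
      part1AltLoop cs found f l
        = ((if found then f else part1Scan cs f), part1Scan cs.reverse l) := by
  induction cs with
  | nil => intro found f l; cases found <;> simp [part1AltLoop, part1Scan]
  | cons c cs ih =>
      intro found f l
      by_cases h : PySem.Chars.isdigit c
      · cases found <;>
          simp [part1AltLoop, part1Scan, h, ih, List.reverse_cons, part1Scan_append]
      · simp [part1AltLoop, part1Scan, h, ih, List.reverse_cons, part1Scan_append]
-- ===== VERDICT (by name: the statement is the Claim_ definition above) =====
theorem part1_spec : Claim_equal_part1 := by
  intro l _
  show part1 l = part1_alt l
  simp [part1, part1_alt, part1AltLoop_eq]
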